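-- pv_equiv track=rewrite | github.com/ernestedmund/sd-tax-bot-api | rag_engine.py | parse_knowledge_base
-- ===== SOURCE A (Python) =====
-- def parse_knowledge_base(raw: str) -> list[dict]:
--     chunks = []
--     current = None
--     for line in raw.strip().splitlines():
--         line = line.strip()
--         if line.startswith("## "):
--             if current:
--                 chunks.append(current)
--             parts = line[3:].split(" | ", 2)
--             current = {
--                 "id": parts[0] if len(parts) > 0 else "",
--                 "topic": parts[1] if len(parts) > 1 else "",
--                 "question": parts[2] if len(parts) > 2 else "",
--                 "content": "",
--                 "source": ""
--             }
--         elif line.startswith("Source:") and current: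
--             current["source"] = line[7:].strip()
--         elif current is not None:
--             current["content"] = (current["content"] + " " + line).strip()
--     if current:
--         chunks.append(current)
--     return chunks
-- ===== SOURCE B (Python) =====
-- def _make_chunk(rest, rev_body):
--     parts = rest.split(" | ", 2) + ["", ""]
--     source = next((l[7:].strip() for l in rev_body if l.startswith("Source:")), "")
--     content = " ".join(l for l in reversed(rev_body)
--                        if l and not l.startswith("Source:"))
--     return {"id": parts[0], "topic": parts[1], "question": parts[2],
--             "content": content, "source": source}
--
--
-- def parse_knowledge_base(raw: str) -> list[dict]:
--     chunks = []
--     tail = []  # stripped lines seen so far (in reverse order) below the current position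
--     for line in reversed(raw.strip().splitlines()):
--         line = line.strip()
--         if line.startswith("## "):
--             chunks.append(_make_chunk(line[3:], tail))
--             tail = []
--         else:
--             tail.append(line)
--     chunks.reverse()
--     return chunks
-- ===== Notes on version B (the rewrite author's own statement) =====
-- stated objective: alternative
-- what changed: A's single forward pass that mutates a per-chunk accumulator dict line by line is replaced by a reverse sweep that groups the stripped lines into header-delimited blocks and builds each chunk dict in one shot: content as a join of the block's plain lines, source by a first-match scan over the reversed block.
import Mathlib
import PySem

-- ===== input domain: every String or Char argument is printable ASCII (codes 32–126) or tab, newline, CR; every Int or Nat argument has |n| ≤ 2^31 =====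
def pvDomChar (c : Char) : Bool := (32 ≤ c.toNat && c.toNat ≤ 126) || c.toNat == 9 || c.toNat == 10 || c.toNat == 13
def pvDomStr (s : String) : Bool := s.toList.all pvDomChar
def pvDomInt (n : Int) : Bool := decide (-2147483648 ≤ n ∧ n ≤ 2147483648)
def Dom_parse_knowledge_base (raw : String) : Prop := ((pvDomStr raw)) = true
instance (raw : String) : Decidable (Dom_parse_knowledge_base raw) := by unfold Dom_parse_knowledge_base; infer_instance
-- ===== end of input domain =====

-- B replaces A's single forward pass with mutable per-chunk state by a reverse sweep that
-- slices the lines into header-delimited blocks and builds each chunk dict in one shot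
-- (content as a join of the block's plain lines, source as a first-match scan); objective: alternative.

-- ===== PORT A =====
-- body of A's loop after `line = line.strip()` (the strip is applied by pkbStepA below)
def pkbBodyA (st : List (PySem.Dict String String) × Option (PySem.Dict String String))
    (line : String) : List (PySem.Dict String String) × Option (PySem.Dict String String) :=
  if PySem.Str.startswith line "## " then
    -- `if current:` — the current dict always has 5 entries, so truthiness = `is not None`
    let chunks := match st.2 with | some c => st.1 ++ [c] | none => st.1
    let parts := (PySem.Str.splitMax? (PySem.Str.slice line (some 3) none) " | " 2).getD []  -- sep ≠ "" so never none
    (chunks, some ⟨[("id", if 0 < parts.length then (PySem.List.pyGet? parts 0).getD "" else ""),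
                    ("topic", if 1 < parts.length then (PySem.List.pyGet? parts 1).getD "" else ""),
                    ("question", if 2 < parts.length then (PySem.List.pyGet? parts 2).getD "" else ""),
                    ("content", ""), ("source", "")]⟩)
  else if PySem.Str.startswith line "Source:" then
    match st.2 with
    | some c => (st.1, some (c.insert "source" (PySem.Str.strip (PySem.Str.slice line (some 7) none))))
    | none => st  -- `and current` fails, and the last `elif current is not None` fails too
  else
    match st.2 with
    | some c => (st.1, some (c.insert "content" (PySem.Str.strip (c.getD "content" "" ++ " " ++ line))))
    | none => st

def pkbStepA (st : List (PySem.Dict String String) × Option (PySem.Dict String String))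
    (line : String) : List (PySem.Dict String String) × Option (PySem.Dict String String) :=
  pkbBodyA st (PySem.Str.strip line)

def parse_knowledge_base (raw : String) : List (List (String × String)) :=
  let st := (PySem.Str.splitlines (PySem.Str.strip raw)).foldl pkbStepA ([], none)
  let chunks := match st.2 with | some c => st.1 ++ [c] | none => st.1
  chunks.map PySem.Dict.items

-- ===== PORT B =====
def pkbMakeChunk (rest : String) (revBody : List String) : List (String × String) :=
  let parts := ((PySem.Str.splitMax? rest " | " 2).getD []) ++ ["", ""]  -- sep ≠ "" so never none
  let source := ((revBody.find? (fun l => PySem.Str.startswith l "Source:")).map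
      (fun l => PySem.Str.strip (PySem.Str.slice l (some 7) none))).getD ""
  let content := PySem.Str.join " " (revBody.reverse.filter
      (fun l => !(l == "") && !(PySem.Str.startswith l "Source:")))
  [("id", (PySem.List.pyGet? parts 0).getD ""), ("topic", (PySem.List.pyGet? parts 1).getD ""),
   ("question", (PySem.List.pyGet? parts 2).getD ""), ("content", content), ("source", source)]

-- body of B's loop after `line = line.strip()` (the strip is applied by pkbStepB below)
def pkbBodyB (st : List (List (String × String)) × List String)
    (line : String) : List (List (String × String)) × List String :=
  if PySem.Str.startswith line "## " then
    (st.1 ++ [pkbMakeChunk (PySem.Str.slice line (some 3) none) st.2], [])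
  else (st.1, st.2 ++ [line])

def pkbStepB (st : List (List (String × String)) × List String)
    (line : String) : List (List (String × String)) × List String :=
  pkbBodyB st (PySem.Str.strip line)

def parse_knowledge_base_alt (raw : String) : List (List (String × String)) :=
  let st := ((PySem.Str.splitlines (PySem.Str.strip raw)).reverse).foldl pkbStepB ([], [])
  st.1.reverse

-- ===== PRECONDITION & SPEC =====
def Spec_parse_knowledge_base (raw : String) (out : List (List (String × String))) : Prop := out = parse_knowledge_base_alt raw
instance (raw : String) (out : List (List (String × String))) : Decidable (Spec_parse_knowledge_base raw out) := by unfold Spec_parse_knowledge_base; infer_instance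

-- ===== CLAIM (what is proved, stated in full; the proofs are below) =====
def Claim_equal_parse_knowledge_base : Prop := ∀ (raw : String), Dom_parse_knowledge_base raw → Spec_parse_knowledge_base raw (parse_knowledge_base raw)

-- ===== LEMMAS AND PROOFS =====

-- "word-join": how A's incremental `(content + " " + line).strip()` composes stripped words
def pkbWS (d l : String) : String := if l = "" then d else if d = "" then l else d ++ " " ++ l

lemma pkb_dropWhile_idem (p : Char → Bool) (l : List Char) :
    List.dropWhile p (List.dropWhile p l) = List.dropWhile p l := by
  induction l with
  | nil => simp
  | cons c cs ih =>
    by_cases h : p c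
    · simpa [h] using ih
    · simp [h]

lemma pkb_dropWhile_of_prefix (p : Char → Bool) (t x : List Char)
    (ht : List.dropWhile p t = t) (hx : x <+: t) : List.dropWhile p x = x := by
  cases x with
  | nil => simp
  | cons c cs =>
    cases t with
    | nil => simp at hx
    | cons c' cs' =>
      have hc : c' = c := by
        obtain ⟨u, hu⟩ := hx
        simpa using congrArg (·.head?) hu.symm
      by_cases h : p c
      · exfalso
        rw [List.dropWhile_cons, hc, if_pos h] at ht
        have h1 := congrArg List.length ht
        have h2 := List.length_dropWhile_le p cs'
        simp at h1
        omega
      · simp [h]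

lemma pkb_strip_lstrip (s : List Char) :
    List.dropWhile PySem.Chars.isspace (PySem.Chars.strip s) = PySem.Chars.strip s := by
  have h1 : PySem.Chars.strip s <+: PySem.Chars.lstrip s := by
    simpa [PySem.Chars.strip, PySem.Chars.rstrip] using
      (List.reverse_prefix.mpr (List.dropWhile_suffix (l := (PySem.Chars.lstrip s).reverse)
        PySem.Chars.isspace)).trans (by simp)
  exact pkb_dropWhile_of_prefix _ _ _ (pkb_dropWhile_idem _ s) h1

lemma pkb_strip_rstrip (s : List Char) :
    List.dropWhile PySem.Chars.isspace (PySem.Chars.strip s).reverse = (PySem.Chars.strip s).reverse := by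
  simp only [PySem.Chars.strip, PySem.Chars.rstrip, List.reverse_reverse]
  exact pkb_dropWhile_idem _ _

lemma pkb_stripped_iff (s : List Char) :
    PySem.Chars.strip s = s ↔
      (List.dropWhile PySem.Chars.isspace s = s ∧
       List.dropWhile PySem.Chars.isspace s.reverse = s.reverse) := by
  constructor
  · intro h
    exact ⟨by simpa [h] using pkb_strip_lstrip s, by simpa [h] using pkb_strip_rstrip s⟩
  · rintro ⟨h1, h2⟩
    simp [PySem.Chars.strip, PySem.Chars.lstrip, PySem.Chars.rstrip, h1, h2]

lemma pkb_strip_idem (s : List Char) :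
    PySem.Chars.strip (PySem.Chars.strip s) = PySem.Chars.strip s :=
  (pkb_stripped_iff _).mpr ⟨pkb_strip_lstrip s, pkb_strip_rstrip s⟩

lemma pkb_str_strip_idem (s : String) :
    PySem.Str.strip (PySem.Str.strip s) = PySem.Str.strip s := by
  apply String.toList_injective
  simp [PySem.Str.toList_strip, pkb_strip_idem]

lemma pkb_strip_cat (d l : List Char) (hd : PySem.Chars.strip d = d) (hl : PySem.Chars.strip l = l) :
    PySem.Chars.strip (d ++ ' ' :: l) =
      (if l = [] then d else if d = [] then l else d ++ ' ' :: l) := by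
  obtain ⟨hd1, hd2⟩ := (pkb_stripped_iff d).mp hd
  obtain ⟨hl1, hl2⟩ := (pkb_stripped_iff l).mp hl
  have hsp : PySem.Chars.isspace ' ' = true := by decide
  by_cases hle : l = []
  · subst hle
    by_cases hde : d = []
    · subst hde; decide
    · rw [if_pos rfl]
      simp only [PySem.Chars.strip, PySem.Chars.lstrip, PySem.Chars.rstrip]
      rw [List.dropWhile_append, hd1, if_neg (by simp [hde])]
      simp [hsp, hd2]
  · by_cases hde : d = []
    · subst hde
      rw [if_neg hle, if_pos rfl, List.nil_append]
      simp only [PySem.Chars.strip, PySem.Chars.lstrip, PySem.Chars.rstrip]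
      simp [hsp, hl1, hl2]
    · rw [if_neg hle, if_neg hde]
      simp only [PySem.Chars.strip, PySem.Chars.lstrip, PySem.Chars.rstrip]
      rw [List.dropWhile_append, hd1, if_neg (by simp [hde])]
      rw [List.reverse_append, List.reverse_cons, List.append_assoc, List.dropWhile_append, hl2,
        if_neg (by simp [hle])]
      simp

lemma pkb_str_strip_cat (d l : String) (hd : PySem.Str.strip d = d) (hl : PySem.Str.strip l = l) :
    PySem.Str.strip (d ++ " " ++ l) = pkbWS d l := by
  have hd' : PySem.Chars.strip d.toList = d.toList := by
    conv_rhs => rw [← hd]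
    simp [PySem.Str.toList_strip]
  have hl' : PySem.Chars.strip l.toList = l.toList := by
    conv_rhs => rw [← hl]
    simp [PySem.Str.toList_strip]
  apply String.toList_injective
  have hsplit : (d ++ " " ++ l).toList = d.toList ++ ' ' :: l.toList := by
    simp [String.toList_append]
  rw [PySem.Str.toList_strip, hsplit, pkb_strip_cat _ _ hd' hl']
  simp only [pkbWS]
  by_cases hle : l = ""
  · simp [hle]
  · by_cases hde : d = ""
    · simp [hle, hde, ((String.toList_eq_nil_iff).not.mpr hle : ¬ l.toList = [])]
    · rw [if_neg (((String.toList_eq_nil_iff).not.mpr hle : ¬ l.toList = [])),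
        if_neg (((String.toList_eq_nil_iff).not.mpr hde : ¬ d.toList = [])),
        if_neg hle, if_neg hde, hsplit]

lemma pkb_WS_stripped (d l : String) (hd : PySem.Str.strip d = d) (hl : PySem.Str.strip l = l) :
    PySem.Str.strip (pkbWS d l) = pkbWS d l := by
  rw [← pkb_str_strip_cat d l hd hl, pkb_str_strip_idem]

lemma pkb_append_ne_empty (d l : String) : d ++ " " ++ l ≠ "" := by
  intro h
  have h' := congrArg String.toList h
  simp [String.toList_append, String.toList_eq_nil_iff] at h'

lemma pkb_WS_assoc (d l j : String) : pkbWS (pkbWS d l) j = pkbWS d (pkbWS l j) := by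
  by_cases hl : l = ""
  · subst hl
    by_cases hj : j = "" <;> simp [pkbWS, hj]
  · by_cases hj : j = ""
    · subst hj; simp [pkbWS, hl]
    · by_cases hd : d = ""
      · subst hd; simp [pkbWS, hl, hj, pkb_append_ne_empty l j]
      · simp [pkbWS, hl, hj, hd, String.append_assoc]

def pkbFilter (xs : List String) : List String :=
  xs.filter (fun l => !(l == "") && !(PySem.Str.startswith l "Source:"))

def pkbJ (xs : List String) : String := PySem.Str.join " " (pkbFilter xs)

lemma pkb_J_nil : pkbJ [] = "" := by
  apply String.toList_injective
  simp [pkbJ, pkbFilter, PySem.Str.toList_join, PySem.Chars.join_nil]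

lemma pkb_join_nil : PySem.Str.join " " ([] : List String) = "" := by
  apply String.toList_injective
  simp [PySem.Str.toList_join, PySem.Chars.join_nil]

lemma pkb_join_ne_empty (y : String) (ys : List String) (hy : y ≠ "") :
    PySem.Str.join " " (y :: ys) ≠ "" := by
  intro h
  have h' := congrArg String.toList h
  rw [PySem.Str.toList_join] at h'
  cases ys with
  | nil =>
    simp only [List.map_cons, List.map_nil, PySem.Chars.join_singleton] at h'
    exact hy (String.toList_eq_nil_iff.mp (by simpa using h'))
  | cons z zs =>
    simp only [List.map_cons, PySem.Chars.join_cons_cons] at h'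
    simp at h'

lemma pkb_join_cons (y : String) (ys : List String) (hy : y ≠ "") (hys : ∀ z ∈ ys, z ≠ "") :
    PySem.Str.join " " (y :: ys) = pkbWS y (PySem.Str.join " " ys) := by
  cases ys with
  | nil =>
    rw [pkb_join_nil, pkbWS, if_pos rfl]
    apply String.toList_injective
    simp [PySem.Str.toList_join, PySem.Chars.join_singleton]
  | cons z zs =>
    rw [pkbWS, if_neg (pkb_join_ne_empty z zs (hys z (by simp))), if_neg hy]
    apply String.toList_injective
    simp [PySem.Str.toList_join, PySem.Chars.join_cons_cons, String.toList_append]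

lemma pkb_filter_ne_empty (xs : List String) : ∀ z ∈ pkbFilter xs, z ≠ "" := by
  intro z hz
  simp only [pkbFilter, List.mem_filter] at hz
  have := hz.2
  simp only [Bool.and_eq_true, Bool.not_eq_true', beq_eq_false_iff_ne] at this
  exact this.1

lemma pkb_J_cons (l : String) (xs : List String) (hl : ¬ PySem.Str.startswith l "Source:" = true) :
    pkbJ (l :: xs) = pkbWS l (pkbJ xs) := by
  have hl' : PySem.Chars.startswith l.toList ['S','o','u','r','c','e',':'] = false := by
    simpa [PySem.Str.startswith, show "Source:".toList = ['S','o','u','r','c','e',':'] from rfl]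
      using hl
  by_cases hle : l = ""
  · subst hle
    simp only [pkbJ, pkbFilter, List.filter_cons]
    rw [if_neg (by simp)]
    simp only [pkbWS]
    split_ifs with h <;> simp_all
  · simp only [pkbJ, pkbFilter, List.filter_cons]
    rw [if_pos (by simp [hle, hl'])]
    exact pkb_join_cons l _ hle (pkb_filter_ne_empty xs)

lemma pkb_J_cons_src (l : String) (xs : List String) (hl : PySem.Str.startswith l "Source:" = true) :
    pkbJ (l :: xs) = pkbJ xs := by
  have hl' : PySem.Chars.startswith l.toList ['S','o','u','r','c','e',':'] = true := by
    simpa [PySem.Str.startswith, show "Source:".toList = ['S','o','u','r','c','e',':'] from rfl]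
      using hl
  simp only [pkbJ, pkbFilter, List.filter_cons]
  rw [if_neg (by simp [hl'])]

lemma pkb_go_ne_nil (sep : List Char) (fuel m : Nat) (l cur : List Char) (acc : List (List Char)) :
    PySem.Chars.splitOnMax.go sep fuel m l cur acc ≠ [] := by
  induction fuel generalizing m l cur acc with
  | zero => simp [PySem.Chars.splitOnMax.go]
  | succ fuel ih =>
    match l with
    | [] => simp [PySem.Chars.splitOnMax.go]
    | c :: rest =>
      rw [PySem.Chars.splitOnMax.go.eq_def]
      dsimp only
      split_ifs
      · simp
      · exact ih (m - 1) (List.drop sep.length (c :: rest)) [] (cur.reverse :: acc)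
      · exact ih m rest (c :: cur) acc

lemma pkb_parts_ne_nil (rest : String) :
    (PySem.Str.splitMax? rest " | " 2).getD [] ≠ [] := by
  have h : PySem.Str.splitMax? rest " | " 2 =
      some ((PySem.Chars.splitOnMax rest.toList (" | ".toList) 2).map String.ofList) := by
    simp [PySem.Str.splitMax?, PySem.Chars.splitMax?]
  rw [h]
  simp only [Option.getD_some, ne_eq, List.map_eq_nil_iff]
  rw [PySem.Chars.splitOnMax, if_neg (by norm_num)]
  exact pkb_go_ne_nil _ _ _ _ _ _

lemma pkb_field_eq (ps : List String) (hps : ps ≠ []) (k : Nat) (hk : k < 3) :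
    (if k < ps.length then (PySem.List.pyGet? ps (k : Int)).getD "" else "") =
      (PySem.List.pyGet? (ps ++ ["", ""]) (k : Int)).getD "" := by
  have h1 : 1 ≤ ps.length := List.length_pos_iff.mpr hps
  by_cases h : k < ps.length
  · rw [if_pos h]
    simp [PySem.List.pyGet?_natCast, List.getElem?_append_left h]
  · rw [if_neg h]
    simp only [PySem.List.pyGet?_natCast]
    rw [List.getElem?_append_right (by omega)]
    have h2 : k - ps.length = 0 ∨ k - ps.length = 1 := by omega
    rcases h2 with h2 | h2 <;> simp [h2]

def pkbMkD (a b q d s : String) : PySem.Dict String String :=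
  ⟨[("id", a), ("topic", b), ("question", q), ("content", d), ("source", s)]⟩

lemma pkb_mkD_getD_content (a b q d s : String) :
    (pkbMkD a b q d s).getD "content" "" = d := by
  simp [pkbMkD, PySem.Dict.getD, PySem.Dict.get?]

lemma pkb_mkD_insert_source (a b q d s v : String) :
    (pkbMkD a b q d s).insert "source" v = pkbMkD a b q d v := by
  simp [pkbMkD, PySem.Dict.insert, PySem.Dict.contains]

lemma pkb_mkD_insert_content (a b q d s v : String) :
    (pkbMkD a b q d s).insert "content" v = pkbMkD a b q v s := by
  simp [pkbMkD, PySem.Dict.insert, PySem.Dict.contains]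

def pkbSrc (tl : List String) (s : String) : String :=
  ((tl.find? (fun l => PySem.Str.startswith l "Source:")).map
      (fun l => PySem.Str.strip (PySem.Str.slice l (some 7) none))).getD s

def pkbAbsorb (a b q d s : String) (tl : List String) : List (String × String) :=
  [("id", a), ("topic", b), ("question", q), ("content", pkbWS d (pkbJ tl.reverse)),
   ("source", pkbSrc tl s)]

lemma pkb_absorb_nil (a b q d s : String) :
    pkbAbsorb a b q d s [] = (pkbMkD a b q d s).items := by
  simp [pkbAbsorb, pkbMkD, pkbSrc, pkb_J_nil, pkbWS]

lemma pkb_absorb_snoc_src (a b q d s l : String)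
    (hl : PySem.Str.startswith l "Source:" = true) (tl : List String) :
    pkbAbsorb a b q d s (tl ++ [l]) =
      pkbAbsorb a b q d (PySem.Str.strip (PySem.Str.slice l (some 7) none)) tl := by
  have hl' : PySem.Chars.startswith l.toList ['S','o','u','r','c','e',':'] = true := by
    simpa [PySem.Str.startswith, show "Source:".toList = ['S','o','u','r','c','e',':'] from rfl]
      using hl
  simp only [pkbAbsorb, pkbSrc, List.reverse_append, List.reverse_cons, List.reverse_nil,
    List.nil_append, List.singleton_append, List.find?_append]
  rw [pkb_J_cons_src l _ hl]
  cases hfind : tl.find? (fun l => PySem.Str.startswith l "Source:") with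
  | none => simp [hl']
  | some x => simp

lemma pkb_absorb_snoc_other (a b q d s l : String)
    (hl : ¬ PySem.Str.startswith l "Source:" = true) (tl : List String) :
    pkbAbsorb a b q d s (tl ++ [l]) = pkbAbsorb a b q (pkbWS d l) s tl := by
  have hl' : PySem.Chars.startswith l.toList ['S','o','u','r','c','e',':'] = false := by
    simpa [PySem.Str.startswith, show "Source:".toList = ['S','o','u','r','c','e',':'] from rfl]
      using hl
  simp only [pkbAbsorb, pkbSrc, List.reverse_append, List.reverse_cons, List.reverse_nil,
    List.nil_append, List.singleton_append, List.find?_append]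
  rw [pkb_J_cons l _ hl, ← pkb_WS_assoc]
  cases hfind : tl.find? (fun l => PySem.Str.startswith l "Source:") with
  | none => simp [hl']
  | some x => simp


def pkbGlue (cur : Option (String × String × String × String × String))
    (r : List (List (String × String)) × List String) : List (List (String × String)) :=
  match cur with
  | none => r.1.reverse
  | some (a, b, q, d, s) => pkbAbsorb a b q d s r.2 :: r.1.reverse

def pkbCur (cur : Option (String × String × String × String × String)) :
    Option (PySem.Dict String String) :=
  cur.map (fun t => pkbMkD t.1 t.2.1 t.2.2.1 t.2.2.2.1 t.2.2.2.2)

def pkbFinish (st : List (PySem.Dict String String) × Option (PySem.Dict String String)) :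
    List (List (String × String)) :=
  (match st.2 with | some c => st.1 ++ [c] | none => st.1).map PySem.Dict.items

def pkbOK (cur : Option (String × String × String × String × String)) : Prop :=
  match cur with
  | none => True
  | some (_, _, _, d, _) => PySem.Str.strip d = d

lemma pkb_strip_empty : PySem.Str.strip "" = "" := by
  apply String.toList_injective
  rw [PySem.Str.toList_strip]
  simp [PySem.Chars.strip, PySem.Chars.lstrip, PySem.Chars.rstrip]

lemma pkb_WS_empty_left (j : String) : pkbWS "" j = j := by
  by_cases hj : j = "" <;> simp [pkbWS, hj]

lemma pkb_chunk_eq (rest : String) (tl : List String) :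
    pkbAbsorb (if 0 < ((PySem.Str.splitMax? rest " | " 2).getD []).length then
        (PySem.List.pyGet? ((PySem.Str.splitMax? rest " | " 2).getD []) 0).getD "" else "")
      (if 1 < ((PySem.Str.splitMax? rest " | " 2).getD []).length then
        (PySem.List.pyGet? ((PySem.Str.splitMax? rest " | " 2).getD []) 1).getD "" else "")
      (if 2 < ((PySem.Str.splitMax? rest " | " 2).getD []).length then
        (PySem.List.pyGet? ((PySem.Str.splitMax? rest " | " 2).getD []) 2).getD "" else "")
      "" "" tl = pkbMakeChunk rest tl := by
  have hne := pkb_parts_ne_nil rest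
  have f0 := pkb_field_eq _ hne 0 (by omega)
  have f1 := pkb_field_eq _ hne 1 (by omega)
  have f2 := pkb_field_eq _ hne 2 (by omega)
  simp only [pkbAbsorb, pkbMakeChunk, pkbSrc]
  rw [show ((0:Nat) : Int) = (0:Int) from rfl] at f0
  rw [show ((1:Nat) : Int) = (1:Int) from rfl] at f1
  rw [show ((2:Nat) : Int) = (2:Int) from rfl] at f2
  rw [f0, f1, f2, pkbJ, pkbFilter, pkb_WS_empty_left]

lemma pkb_main (ms : List String) (H : ∀ l ∈ ms, PySem.Str.strip l = l) :
    ∀ (cs : List (PySem.Dict String String))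
      (cur : Option (String × String × String × String × String)), pkbOK cur →
      pkbFinish (List.foldl pkbBodyA (cs, pkbCur cur) ms) =
        cs.map PySem.Dict.items ++
          pkbGlue cur (List.foldr (fun l st => pkbBodyB st l) ([], []) ms) := by
  induction ms with
  | nil =>
    intro cs cur _
    match cur with
    | none => simp [pkbFinish, pkbCur, pkbGlue]
    | some (a, b, q, d, s) => simp [pkbFinish, pkbCur, pkbGlue, pkb_absorb_nil]
  | cons l ms ih =>
    intro cs cur hok
    have Hl : PySem.Str.strip l = l := H l (by simp)
    have Hms : ∀ x ∈ ms, PySem.Str.strip x = x := fun x hx => H x (by simp [hx])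
    rw [List.foldl_cons, List.foldr_cons]
    by_cases hh : PySem.Str.startswith l "## " = true
    · -- header line
      have hstep : pkbBodyA (cs, pkbCur cur) l =
          ((match pkbCur cur with | some c => cs ++ [c] | none => cs),
            pkbCur (some
              ((if 0 < ((PySem.Str.splitMax? (PySem.Str.slice l (some 3) none) " | " 2).getD []).length then (PySem.List.pyGet? ((PySem.Str.splitMax? (PySem.Str.slice l (some 3) none) " | " 2).getD []) 0).getD "" else ""),
               (if 1 < ((PySem.Str.splitMax? (PySem.Str.slice l (some 3) none) " | " 2).getD []).length then (PySem.List.pyGet? ((PySem.Str.splitMax? (PySem.Str.slice l (some 3) none) " | " 2).getD []) 1).getD "" else ""),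
               (if 2 < ((PySem.Str.splitMax? (PySem.Str.slice l (some 3) none) " | " 2).getD []).length then (PySem.List.pyGet? ((PySem.Str.splitMax? (PySem.Str.slice l (some 3) none) " | " 2).getD []) 2).getD "" else ""),
               "", ""))) := by
        simp only [pkbBodyA, if_pos hh, pkbCur, Option.map_some, pkbMkD]
      rw [hstep, ih Hms _ _ (by simp [pkbOK, pkb_strip_empty])]
      have hB : pkbBodyB (List.foldr (fun l st => pkbBodyB st l) ([], []) ms) l =
          ((List.foldr (fun l st => pkbBodyB st l) ([], []) ms).1 ++
            [pkbMakeChunk (PySem.Str.slice l (some 3) none)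
              (List.foldr (fun l st => pkbBodyB st l) ([], []) ms).2], []) := by
        simp only [pkbBodyB, if_pos hh]
      rw [hB]
      match cur with
      | none =>
        simp only [pkbCur, Option.map_none, pkbGlue, List.reverse_append, List.reverse_cons]
        rw [pkb_chunk_eq]
        simp
      | some (a, b, q, d, s) =>
        simp only [pkbCur, Option.map_some, pkbGlue, List.map_append, List.map_cons,
          List.map_nil, List.reverse_append, List.reverse_cons]
        rw [pkb_chunk_eq, pkb_absorb_nil]
        simp
    · by_cases hs : PySem.Str.startswith l "Source:" = true
      · -- source line
        have hB : pkbBodyB (List.foldr (fun l st => pkbBodyB st l) ([], []) ms) l =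
            ((List.foldr (fun l st => pkbBodyB st l) ([], []) ms).1,
             (List.foldr (fun l st => pkbBodyB st l) ([], []) ms).2 ++ [l]) := by
          simp only [pkbBodyB, if_neg hh]
        rw [hB]
        match cur with
        | none =>
          have hstep : pkbBodyA (cs, pkbCur none) l = (cs, pkbCur none) := by
            simp only [pkbBodyA, if_neg hh, if_pos hs, pkbCur, Option.map_none]
          rw [hstep, ih Hms _ none trivial]
          simp [pkbGlue]
        | some (a, b, q, d, s) =>
          have hstep : pkbBodyA (cs, pkbCur (some (a, b, q, d, s))) l =
              (cs, pkbCur (some (a, b, q, d,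
                PySem.Str.strip (PySem.Str.slice l (some 7) none)))) := by
            simp only [pkbBodyA, if_neg hh, if_pos hs, pkbCur, Option.map_some,
              pkb_mkD_insert_source]
          rw [hstep, ih Hms _ _ (by simpa [pkbOK] using hok)]
          simp only [pkbGlue]
          rw [pkb_absorb_snoc_src a b q d s l hs]
      · -- plain content line
        have hB : pkbBodyB (List.foldr (fun l st => pkbBodyB st l) ([], []) ms) l =
            ((List.foldr (fun l st => pkbBodyB st l) ([], []) ms).1,
             (List.foldr (fun l st => pkbBodyB st l) ([], []) ms).2 ++ [l]) := by
          simp only [pkbBodyB, if_neg hh]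
        rw [hB]
        match cur with
        | none =>
          have hstep : pkbBodyA (cs, pkbCur none) l = (cs, pkbCur none) := by
            simp only [pkbBodyA, if_neg hh, if_neg hs, pkbCur, Option.map_none]
          rw [hstep, ih Hms _ none trivial]
          simp [pkbGlue]
        | some (a, b, q, d, s) =>
          have hd : PySem.Str.strip d = d := by simpa [pkbOK] using hok
          have hstep : pkbBodyA (cs, pkbCur (some (a, b, q, d, s))) l =
              (cs, pkbCur (some (a, b, q, pkbWS d l, s))) := by
            simp only [pkbBodyA, if_neg hh, if_neg hs, pkbCur, Option.map_some,
              pkb_mkD_getD_content, pkb_mkD_insert_content, pkb_str_strip_cat d l hd Hl]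
          rw [hstep, ih Hms _ _ (by simp [pkbOK, pkb_WS_stripped d l hd Hl])]
          simp only [pkbGlue]
          rw [pkb_absorb_snoc_other a b q d s l hs]


-- ===== VERDICT (by name: the statement is the Claim_ definition above) =====
theorem parse_knowledge_base_spec : Claim_equal_parse_knowledge_base := by
  intro raw _
  unfold Spec_parse_knowledge_base
  show pkbFinish (List.foldl pkbStepA ([], none) (PySem.Str.splitlines (PySem.Str.strip raw))) =
      (List.foldl pkbStepB ([], []) (PySem.Str.splitlines (PySem.Str.strip raw)).reverse).1.reverse
  rw [show List.foldl pkbStepA ([], none) (PySem.Str.splitlines (PySem.Str.strip raw)) =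
      List.foldl pkbBodyA ([], pkbCur none)
        ((PySem.Str.splitlines (PySem.Str.strip raw)).map PySem.Str.strip) from by
    rw [List.foldl_map]; rfl]
  have hstr : ∀ x ∈ (PySem.Str.splitlines (PySem.Str.strip raw)).map PySem.Str.strip,
      PySem.Str.strip x = x := by
    intro x hx
    obtain ⟨y, hy, rfl⟩ := List.mem_map.mp hx
    exact pkb_str_strip_idem y
  rw [pkb_main _ hstr [] none trivial]
  rw [show List.foldl pkbStepB ([], []) (PySem.Str.splitlines (PySem.Str.strip raw)).reverse =
      List.foldl pkbBodyB ([], [])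
        (((PySem.Str.splitlines (PySem.Str.strip raw)).map PySem.Str.strip).reverse) from by
    rw [← List.map_reverse, List.foldl_map]; rfl]
  rw [List.foldl_reverse]
  simp only [pkbGlue, List.nil_append, List.map_nil]
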